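-- pv_equiv track=rewrite | github.com/approjecthub/problem-solving-with-python | vowel_count.py | char_frequency_substring
-- ===== SOURCE A (Python) =====
-- a = 'abc'
--
-- def char_frequency_substring(word = a):
--     vowel_count=0
--     char_count = [0]*len(word)
--     n = len(word)
--     for i in range(n):
--         if(i==0):
--             char_count[i] = n
--         else:
--             char_count[i] = (n-i)+char_count[i-1]-i
--
--     for i in range(n):
--         if word[i]=='a' or word[i]=='e' or word[i]=='i' or word[i]=='o' or word[i]=='u':
--             vowel_count += char_count[i]
--
--     return [char_count , vowel_count]
-- ===== SOURCE B (Python) =====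
-- a = 'abc'
--
-- def char_frequency_substring(word = a):
--     n = len(word)
--     char_count = [(i + 1) * (n - i) for i in range(n)]
--     vowel_count = sum(cc for ch, cc in zip(word, char_count) if ch in 'aeiou')
--     return [char_count, vowel_count]
-- ===== Notes on version B (the rewrite author's own statement) =====
-- stated objective: simpler
-- what changed: Replaces the recurrence char_count[i] = (n-i)+char_count[i-1]-i (with its i==0 special case) by the direct closed form (i+1)*(n-i) per index, and replaces the index loop over vowels by a zip/sum with a vowel-membership test.
import Mathlib
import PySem

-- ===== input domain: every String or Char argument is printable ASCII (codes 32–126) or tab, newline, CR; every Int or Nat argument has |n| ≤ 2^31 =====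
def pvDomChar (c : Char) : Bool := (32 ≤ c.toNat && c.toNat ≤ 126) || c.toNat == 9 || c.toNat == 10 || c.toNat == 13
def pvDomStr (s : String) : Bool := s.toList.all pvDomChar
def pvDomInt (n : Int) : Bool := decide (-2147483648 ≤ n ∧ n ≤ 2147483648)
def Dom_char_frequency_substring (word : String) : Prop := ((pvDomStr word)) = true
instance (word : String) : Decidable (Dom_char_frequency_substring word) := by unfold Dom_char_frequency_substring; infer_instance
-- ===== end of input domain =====

-- B replaces A's prefix recurrence (with its i==0 special case) by the closed form
-- (i+1)*(n-i) computed directly per index; objective: simpler.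

-- ===== PORT A =====
-- Every index used below is produced by the loop over range(len(word)) and is in
-- range, so Python's word[i] / char_count[i] / char_count[i-1] are exact as getD.
def char_frequency_substring (word : String) : List Int × Int :=
  let n : Nat := word.toList.length
  let char_count : List Int :=
    (List.range n).foldl
      (fun cc i =>
        if i = 0 then cc.set i (n : Int)
        else cc.set i (((n : Int) - (i : Int)) + cc.getD (i - 1) 0 - (i : Int)))
      (List.replicate n 0)
  let vowel_count : Int :=
    (List.range n).foldl
      (fun v i =>
        let c := word.toList.getD i ' '
        if c = 'a' ∨ c = 'e' ∨ c = 'i' ∨ c = 'o' ∨ c = 'u'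
        then v + char_count.getD i 0 else v)
      0
  (char_count, vowel_count)

-- ===== PORT B =====
def char_frequency_substring_alt (word : String) : List Int × Int :=
  let n : Nat := word.toList.length
  let char_count : List Int :=
    (List.range n).map (fun (i : Nat) => ((i : Int) + 1) * ((n : Int) - (i : Int)))
  let vowel_count : Int :=
    (word.toList.zip char_count).foldl
      (fun v p => if p.1 ∈ "aeiou".toList then v + p.2 else v) 0
  (char_count, vowel_count)

-- ===== PRECONDITION & SPEC =====
def Spec_char_frequency_substring (word : String) (out : List Int × Int) : Prop := out = char_frequency_substring_alt word
instance (word : String) (out : List Int × Int) : Decidable (Spec_char_frequency_substring word out) := by unfold Spec_char_frequency_substring; infer_instance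

-- ===== CLAIM (what is proved, stated in full; the proofs are below) =====
def Claim_equal_char_frequency_substring : Prop := ∀ (word : String), Dom_char_frequency_substring word → Spec_char_frequency_substring word (char_frequency_substring word)

-- ===== LEMMAS AND PROOFS =====

-- closed form of A's first loop: invariant after the first k iterations
theorem pv_loop1 (N : Nat) : ∀ k, k ≤ N →
    (List.range k).foldl
      (fun cc i =>
        if i = 0 then cc.set i (N : Int)
        else cc.set i (((N : Int) - (i : Int)) + cc.getD (i - 1) 0 - (i : Int)))
      (List.replicate N 0)
    = (List.range k).map (fun (i : Nat) => ((i : Int) + 1) * ((N : Int) - (i : Int)))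
      ++ List.replicate (N - k) (0 : Int) := by
  intro k
  induction k with
  | zero => simp
  | succ k ih =>
    intro hk
    have hk' : k ≤ N := Nat.le_of_succ_le hk
    rw [List.range_succ, List.foldl_append, List.map_append, ih hk']
    simp only [List.foldl_cons, List.foldl_nil]
    have hlen : ((List.range k).map (fun (i : Nat) => ((i : Int) + 1) * ((N : Int) - (i : Int)))).length = k := by simp
    have hrep : List.replicate (N - k) (0 : Int) = 0 :: List.replicate (N - (k + 1)) 0 := by
      have : N - k = (N - (k + 1)) + 1 := by omega
      rw [this, List.replicate_succ]
    by_cases h0 : k = 0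
    · subst h0
      rcases N with _ | m
      · omega
      · simp [List.replicate_succ]
    · rw [if_neg h0, hrep]
      have hset : ∀ (v : Int),
          ((List.range k).map (fun (i : Nat) => ((i : Int) + 1) * ((N : Int) - (i : Int)))
            ++ 0 :: List.replicate (N - (k + 1)) 0).set k v
          = (List.range k).map (fun (i : Nat) => ((i : Int) + 1) * ((N : Int) - (i : Int)))
            ++ v :: List.replicate (N - (k + 1)) 0 := by
        intro v
        rw [List.set_append_right _ _ (by omega)]
        simp [hlen]
      have hget :
          ((List.range k).map (fun (i : Nat) => ((i : Int) + 1) * ((N : Int) - (i : Int)))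
            ++ 0 :: List.replicate (N - (k + 1)) 0).getD (k - 1) 0
          = (((k : Int) - 1) + 1) * ((N : Int) - ((k : Int) - 1)) := by
        have hk1 : k - 1 < k := by omega
        rw [List.getD_eq_getElem?_getD, List.getElem?_append_left (by simpa [hlen] using hk1)]
        simp [hk1]
        push_cast [Nat.cast_sub (by omega : 1 ≤ k)]
        ring_nf
      rw [hget, hset]
      simp only [List.map_cons, List.map_nil, List.append_assoc, List.cons_append,
        List.nil_append]
      congr 2
      ring

-- fold over indices reading two equal-length lists = fold over their zip
theorem pv_fold_zip {α β γ : Type} (g : γ → α → β → γ) (da : α) (db : β) :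
    ∀ (xs : List α) (ys : List β), ys.length = xs.length → ∀ (init : γ),
    (List.range xs.length).foldl (fun v i => g v (xs.getD i da) (ys.getD i db)) init
    = (xs.zip ys).foldl (fun v p => g v p.1 p.2) init := by
  intro xs
  induction xs with
  | nil => intro ys h init; simp
  | cons x xs ih =>
    intro ys h init
    match ys, h with
    | y :: ys, h =>
      simp only [List.length_cons, List.range_succ_eq_map, List.foldl_cons, List.foldl_map,
        List.zip_cons_cons]
      simp only [List.getD_cons_zero, List.getD_cons_succ]
      exact ih ys (by simpa using h) (g init x y)

theorem pv_vowel_cond (c : Char) :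
    (c ∈ "aeiou".toList) ↔ (c = 'a' ∨ c = 'e' ∨ c = 'i' ∨ c = 'o' ∨ c = 'u') := by
  show c ∈ ['a','e','i','o','u'] ↔ _
  simp

-- ===== VERDICT (by name: the statement is the Claim_ definition above) =====
theorem char_frequency_substring_spec : Claim_equal_char_frequency_substring := by
  intro word _
  unfold Spec_char_frequency_substring char_frequency_substring char_frequency_substring_alt
  simp only
  set N := word.toList.length with hN
  have h1 := pv_loop1 N N (le_refl N)
  rw [Nat.sub_self, List.replicate_zero, List.append_nil] at h1
  rw [h1]
  refine Prod.ext rfl ?_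
  have hlen : ((List.range N).map (fun (i : Nat) => ((i : Int) + 1) * ((N : Int) - (i : Int)))).length
      = word.toList.length := by simp [hN]
  have := pv_fold_zip
    (fun (v : Int) (c : Char) (cnt : Int) =>
      if c = 'a' ∨ c = 'e' ∨ c = 'i' ∨ c = 'o' ∨ c = 'u' then v + cnt else v)
    ' ' 0 word.toList
    ((List.range N).map (fun (i : Nat) => ((i : Int) + 1) * ((N : Int) - (i : Int)))) hlen 0
  rw [← hN] at this
  rw [this]
  apply PySem.List.foldl_congr_mem
  intro v p _
  simp only [pv_vowel_cond]
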